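-- pv_equiv track=rewrite | github.com/DBeewms/Calculadora-Web-Algebra-Lineal | algebra/logic/utilidades.py | _es_decimal_finito
-- ===== SOURCE A (Python) =====
-- def _es_decimal_finito(denominador):
--     """Devuelve True si 1/denominador tiene expansión decimal finita (solo factores 2 y 5)."""
--     if denominador == 0:
--         return False
--     d = denominador if denominador >= 0 else -denominador
--     # eliminar factores 2 y 5
--     while d % 2 == 0:
--         d //= 2
--     while d % 5 == 0:
--         d //= 5
--     return d == 1
-- ===== SOURCE B (Python) =====
-- def _es_decimal_finito(denominador):
--     """Devuelve True si 1/denominador tiene expansión decimal finita (solo factores 2 y 5)."""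
--     if denominador == 0:
--         return False
--     d = abs(denominador)
--     k = d.bit_length()
--     # d | 10**k  iff  d's only prime factors are 2 and 5 (bit_length bounds both exponents)
--     return pow(10, k, d) == 0
-- ===== Notes on version B (the rewrite author's own statement) =====
-- stated objective: alternative
-- what changed: Replaces the two factor-stripping while-loops by a single closed-form divisibility test: d divides ten to the power bit_length(d) exactly when d's only prime factors are two and five.
import Mathlib
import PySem

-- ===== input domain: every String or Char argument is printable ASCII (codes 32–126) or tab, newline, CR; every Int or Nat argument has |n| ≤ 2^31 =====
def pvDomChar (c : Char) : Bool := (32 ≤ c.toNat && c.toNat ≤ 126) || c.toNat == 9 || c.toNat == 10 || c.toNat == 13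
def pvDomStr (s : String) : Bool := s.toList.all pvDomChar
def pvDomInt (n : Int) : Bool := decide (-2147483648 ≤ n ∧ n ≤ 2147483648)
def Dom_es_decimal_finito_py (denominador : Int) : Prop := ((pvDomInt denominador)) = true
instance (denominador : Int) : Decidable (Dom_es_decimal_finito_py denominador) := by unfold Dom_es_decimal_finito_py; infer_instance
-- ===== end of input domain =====

-- B replaces A's two factor-stripping while-loops by one closed-form divisibility test
-- (d divides ten to the power bit_length(d) iff its only prime factors are two and five); alternative, not timed faster.

-- ===== PORT A =====
-- 'while d % p == 0: d //= p' (p is the literal 2 or 5).  The extra '2 ≤ p ∧ d ≠ 0' in the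
-- guard is only for termination: it is implied at every call A makes (A returns early on 0),
-- since d = |denominador| > 0 stays positive under exact division by p.
def stripLoopA (p : Int) (d : Int) : Int :=
  if h : 2 ≤ p ∧ d ≠ 0 ∧ PySem.Int.mod d p = 0 then stripLoopA p (PySem.Int.floordiv d p) else d
termination_by d.natAbs
decreasing_by
  obtain ⟨hp, hd, hm⟩ := h
  have hdvd : p ∣ d := (PySem.Int.mod_eq_zero_iff_dvd d p).mp hm
  obtain ⟨c, rfl⟩ := hdvd
  have hpc : PySem.Int.floordiv (p * c) p = c := by
    rw [PySem.Int.floordiv_eq_ediv_of_pos (by omega)]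
    exact Int.mul_ediv_cancel_left c (by omega)
  rw [hpc]
  have hc : c ≠ 0 := by rintro rfl; simp at hd
  calc c.natAbs < 2 * c.natAbs := by omega
    _ ≤ p.natAbs * c.natAbs := Nat.mul_le_mul_right _ (by omega)
    _ = (p * c).natAbs := (Int.natAbs_mul p c).symm

def es_decimal_finito_py (denominador : Int) : Bool :=
  if denominador = 0 then false
  else
    let d0 := if denominador ≥ 0 then denominador else -denominador
    let d1 := stripLoopA 2 d0
    let d2 := stripLoopA 5 d1
    d2 == 1

-- ===== PORT B =====
def es_decimal_finito_py_alt (denominador : Int) : Bool :=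
  if denominador = 0 then false
  else
    let d := |denominador|
    let k := PySem.Int.bitLength d
    PySem.Int.mod (10 ^ k) d == 0

-- ===== PRECONDITION & SPEC =====
def Spec_es_decimal_finito_py (denominador : Int) (out : Bool) : Prop := out = es_decimal_finito_py_alt denominador
instance (denominador : Int) (out : Bool) : Decidable (Spec_es_decimal_finito_py denominador out) := by unfold Spec_es_decimal_finito_py; infer_instance

-- ===== CLAIM (what is proved, stated in full; the proofs are below) =====
def Claim_equal_es_decimal_finito_py : Prop := ∀ (denominador : Int), Dom_es_decimal_finito_py denominador → Spec_es_decimal_finito_py denominador (es_decimal_finito_py denominador)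

-- ===== LEMMAS AND PROOFS =====

-- Nat mirror of A's stripping loop.
def stripN (p m : Nat) : Nat :=
  if h : 2 ≤ p ∧ m ≠ 0 ∧ m % p = 0 then stripN p (m / p) else m
termination_by m
decreasing_by exact Nat.div_lt_self (by omega) (by omega)

theorem stripLoopA_bridge (p : Int) (hp : 2 ≤ p) :
    ∀ m : Nat, ∀ d : Int, 0 ≤ d → d.natAbs = m → stripLoopA p d = ((stripN p.toNat d.natAbs : Nat) : Int) := by
  intro m
  induction m using Nat.strong_induction_on with
  | _ m ih =>
    intro d hd hm
    rw [stripLoopA, stripN]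
    by_cases hz : d = 0
    · subst hz; simp
    · have hmod : PySem.Int.mod d p = 0 ↔ d.natAbs % p.toNat = 0 := by
        have : d = (d.natAbs : Int) := by omega
        rw [this]
        have : p = (p.toNat : Int) := by omega
        rw [this, PySem.Int.mod_natCast]
        exact_mod_cast Int.natCast_eq_zero
      by_cases hdm : PySem.Int.mod d p = 0
      · rw [dif_pos ⟨hp, hz, hdm⟩, dif_pos ⟨by omega, by omega, hmod.mp hdm⟩]
        have hfd : PySem.Int.floordiv d p = ((d.natAbs / p.toNat : Nat) : Int) := by
          have h1 : d = (d.natAbs : Int) := by omega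
          have h2 : p = (p.toNat : Int) := by omega
          rw [h1, h2]; exact PySem.Int.floordiv_natCast _ _
        rw [hfd]
        have hlt : d.natAbs / p.toNat < m := hm ▸ Nat.div_lt_self (by omega) (by omega)
        have := ih _ hlt ((d.natAbs / p.toNat : Nat) : Int) (Int.natCast_nonneg _) (Int.natAbs_natCast _)
        rw [this, Int.natAbs_natCast]
      · rw [dif_neg (by tauto), dif_neg (by rw [hmod] at hdm; tauto)]
        omega

theorem stripN_dvd (p : Nat) : ∀ m : Nat, stripN p m ∣ m := by
  intro m
  induction m using Nat.strong_induction_on with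
  | _ m ih =>
    rw [stripN]
    split_ifs with h
    · obtain ⟨hp, hz, hm⟩ := h
      exact dvd_trans (ih (m / p) (Nat.div_lt_self (by omega) (by omega))) (Nat.div_dvd_of_dvd (Nat.dvd_of_mod_eq_zero hm))
    · exact dvd_refl m

theorem stripN_not_dvd (p : Nat) (hp : 2 ≤ p) : ∀ m : Nat, m ≠ 0 → ¬ p ∣ stripN p m := by
  intro m
  induction m using Nat.strong_induction_on with
  | _ m ih =>
    intro hz
    rw [stripN]
    split_ifs with h
    · exact ih (m / p) (Nat.div_lt_self (by omega) (by omega))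
        (Nat.div_ne_zero_iff.mpr ⟨by omega, Nat.le_of_dvd (by omega) (Nat.dvd_of_mod_eq_zero h.2.2)⟩)
    · intro hdvd
      exact (by tauto : ¬ m % p = 0) (Nat.mod_eq_zero_of_dvd hdvd)

theorem stripN_pow_mul (p : Nat) : ∀ m : Nat, ∃ a : Nat, m = p ^ a * stripN p m := by
  intro m
  induction m using Nat.strong_induction_on with
  | _ m ih =>
    rw [stripN]
    split_ifs with h
    · obtain ⟨hp, hz, hm⟩ := h
      obtain ⟨a, ha⟩ := ih (m / p) (Nat.div_lt_self (by omega) (by omega))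
      refine ⟨a + 1, ?_⟩
      calc m = p * (m / p) := (Nat.mul_div_cancel' (Nat.dvd_of_mod_eq_zero hm)).symm
        _ = p * (p ^ a * stripN p (m / p)) := by rw [← ha]
        _ = p ^ (a + 1) * stripN p (m / p) := by ring
    · exact ⟨0, by simp⟩

-- the main number-theoretic characterisation, on Nat
theorem strip_iff_dvd_pow (m : Nat) (hm : m ≠ 0) (k : Nat) (hk : m < 2 ^ k) :
    (stripN 5 (stripN 2 m) = 1) ↔ 10 ^ k % m = 0 := by
  have h2 : (2:Nat).Prime := Nat.prime_two
  have h5 : (5:Nat).Prime := by norm_num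
  have hsd : stripN 2 m ∣ m := stripN_dvd 2 m
  have hsz : stripN 2 m ≠ 0 := fun h => hm (Nat.eq_zero_of_zero_dvd (h ▸ hsd))
  have hrd : stripN 5 (stripN 2 m) ∣ stripN 2 m := stripN_dvd 5 _
  rw [← Nat.dvd_iff_mod_eq_zero]
  constructor
  · intro h1
    obtain ⟨a, ha⟩ := stripN_pow_mul 2 m
    obtain ⟨b, hb⟩ := stripN_pow_mul 5 (stripN 2 m)
    rw [h1, mul_one] at hb
    have hak : a < k := by
      have h2a : 2 ^ a ≤ m := Nat.le_of_dvd (by omega) ⟨_, ha⟩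
      exact (Nat.pow_lt_pow_iff_right (by omega)).mp (lt_of_le_of_lt h2a hk)
    have hbk : b < k := by
      have h5b : 5 ^ b ≤ m := Nat.le_of_dvd (by omega) (hb ▸ hsd)
      have h25 : 2 ^ b ≤ 5 ^ b := Nat.pow_le_pow_left (by omega) b
      exact (Nat.pow_lt_pow_iff_right (by omega)).mp (lt_of_le_of_lt (le_trans h25 h5b) hk)
    rw [ha, hb]
    calc (2:Nat) ^ a * 5 ^ b ∣ 2 ^ k * 5 ^ k :=
          mul_dvd_mul (pow_dvd_pow 2 (by omega)) (pow_dvd_pow 5 (by omega))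
      _ = 10 ^ k := by rw [← mul_pow]; norm_num
  · intro hdvd10
    have hr10 : stripN 5 (stripN 2 m) ∣ 10 ^ k := dvd_trans (dvd_trans hrd hsd) hdvd10
    have hnr2 : ¬ (2:Nat) ∣ stripN 5 (stripN 2 m) :=
      fun h => stripN_not_dvd 2 (by omega) m hm (dvd_trans h hrd)
    have hnr5 : ¬ (5:Nat) ∣ stripN 5 (stripN 2 m) := stripN_not_dvd 5 (by omega) _ hsz
    have hc2 : Nat.Coprime (stripN 5 (stripN 2 m)) 2 := ((Nat.Prime.coprime_iff_not_dvd h2).mpr hnr2).symm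
    have hc5 : Nat.Coprime (stripN 5 (stripN 2 m)) 5 := ((Nat.Prime.coprime_iff_not_dvd h5).mpr hnr5).symm
    have hc10 : Nat.Coprime (stripN 5 (stripN 2 m)) (10 ^ k) := by
      have hten : Nat.Coprime (stripN 5 (stripN 2 m)) 10 := by
        have h10 : (10:Nat) = 2 * 5 := by norm_num
        rw [h10]; exact Nat.Coprime.mul_right hc2 hc5
      exact hten.pow_right k
    have hgcd : stripN 5 (stripN 2 m) ∣ Nat.gcd (stripN 5 (stripN 2 m)) (10 ^ k) :=
      Nat.dvd_gcd dvd_rfl hr10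
    rw [Nat.Coprime] at hc10
    rw [hc10] at hgcd
    exact Nat.dvd_one.mp hgcd

-- ===== VERDICT (by name: the statement is the Claim_ definition above) =====
theorem es_decimal_finito_py_spec : Claim_equal_es_decimal_finito_py := by
  intro n _
  unfold Spec_es_decimal_finito_py es_decimal_finito_py es_decimal_finito_py_alt
  by_cases hz : n = 0
  · simp [hz]
  · rw [if_neg hz, if_neg hz]
    show (stripLoopA 5 (stripLoopA 2 (if n ≥ 0 then n else -n)) == 1) =
      (PySem.Int.mod ((10:Int) ^ PySem.Int.bitLength |n|) |n| == 0)
    have hm0 : n.natAbs ≠ 0 := by omega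
    have hd0 : (if n ≥ 0 then n else -n) = ((n.natAbs : Nat) : Int) := by split_ifs <;> omega
    have habs : |n| = ((n.natAbs : Nat) : Int) := Int.abs_eq_natAbs n
    have h1 : stripLoopA 2 (if n ≥ 0 then n else -n) = ((stripN 2 n.natAbs : Nat) : Int) := by
      rw [hd0, stripLoopA_bridge 2 (by omega) n.natAbs _ (Int.natCast_nonneg _) (Int.natAbs_natCast _)]
      rw [Int.natAbs_natCast]
      rfl
    have h2 : stripLoopA 5 ((stripN 2 n.natAbs : Nat) : Int) = ((stripN 5 (stripN 2 n.natAbs) : Nat) : Int) := by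
      rw [stripLoopA_bridge 5 (by omega) (stripN 2 n.natAbs) _ (Int.natCast_nonneg _) (Int.natAbs_natCast _)]
      rw [Int.natAbs_natCast]
      rfl
    have h3 : ∀ (K mm : Nat), PySem.Int.mod ((10:Int) ^ K) (mm : Int) = ((10 ^ K % mm : Nat) : Int) := by
      intro K mm
      have hc : (10:Int) ^ K = ((10 ^ K : Nat) : Int) := by push_cast; ring
      rw [hc, PySem.Int.mod_natCast]
    have hlt : n.natAbs < 2 ^ PySem.Int.bitLength ((n.natAbs : Nat) : Int) := by
      have h := PySem.Int.lt_two_pow_bitLength ((n.natAbs : Nat) : Int)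
      simpa only [Int.natAbs_natCast] using h
    rw [habs, h1, h2, h3]
    have hiff := strip_iff_dvd_pow n.natAbs hm0 _ hlt
    by_cases hres : stripN 5 (stripN 2 n.natAbs) = 1
    · rw [hres, hiff.mp hres]
      decide
    · have hne : 10 ^ PySem.Int.bitLength ((n.natAbs : Nat) : Int) % n.natAbs ≠ 0 :=
        fun h => hres (hiff.mpr h)
      rw [Bool.eq_iff_iff]
      simp only [beq_iff_eq]
      constructor
      · intro h; exact absurd (by exact_mod_cast h) hres
      · intro h; exact absurd (by exact_mod_cast h) hne
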